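-- pv_equiv track=rewrite | github.com/tbarabosch/apihash_to_yara | hash_functions.py | add1505Shl5Hash32
-- ===== SOURCE A (Python) =====
-- def add1505Shl5Hash32(inString,fName):
--   val = 0x1505
--   for ch in inString:
--     val += (val << 5)
--     val &= 0xFFFFFFFF
--     val += ord(ch)
--     val &= 0xFFFFFFFF
--   return val
-- ===== SOURCE B (Python) =====
-- def add1505Shl5Hash32(inString, fName):
--     # closed polynomial form: 0x1505*33^n + sum ord(c_i)*33^(n-1-i) mod 2^32,
--     # computed back-to-front with a running power-of-33 weight
--     acc = 0
--     p = 1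
--     for ch in reversed(inString):
--         acc = (acc + ord(ch) * p) % 0x100000000
--         p = (p * 33) % 0x100000000
--     return (acc + 0x1505 * p) % 0x100000000
-- ===== Notes on version B (the rewrite author's own statement) =====
-- stated objective: alternative
-- what changed: B evaluates the hash as the closed polynomial 0x1505*33^n + sum ord(c_i)*33^(n-1-i) mod 2^32, traversing the string in reverse with a running power-of-33 weight instead of A's forward shift-add-mask rolling accumulator.
import Mathlib
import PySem

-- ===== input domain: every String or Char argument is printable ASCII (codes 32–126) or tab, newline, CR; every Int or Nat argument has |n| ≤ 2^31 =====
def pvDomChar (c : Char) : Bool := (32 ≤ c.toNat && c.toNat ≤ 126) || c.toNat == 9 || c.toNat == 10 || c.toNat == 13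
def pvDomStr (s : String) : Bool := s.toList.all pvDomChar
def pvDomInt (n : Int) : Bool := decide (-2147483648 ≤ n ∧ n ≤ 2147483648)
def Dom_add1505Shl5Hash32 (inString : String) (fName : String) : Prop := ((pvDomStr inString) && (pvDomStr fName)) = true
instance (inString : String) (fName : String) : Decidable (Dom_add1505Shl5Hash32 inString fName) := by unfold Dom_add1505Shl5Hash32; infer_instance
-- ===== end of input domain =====

-- B replaces A's forward shift-add-mask rolling accumulator by the closed polynomial
-- 0x1505*33^n + Σ ord(c_i)*33^(n-1-i) mod 2^32, computed in reverse with a running power-of-33 weight.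


-- ===== PORT A =====
-- literal transliteration: val += val << 5; val &= 0xFFFFFFFF; val += ord(ch); val &= 0xFFFFFFFF
def add1505Shl5Hash32 (inString : String) (fName : String) : Int :=
  inString.toList.foldl
    (fun val ch =>
      let val := val + (val <<< (5 : Nat))
      let val := PySem.Int.band val 0xFFFFFFFF
      let val := val + (ch.toNat : Int)
      PySem.Int.band val 0xFFFFFFFF)
    0x1505

-- ===== PORT B =====
-- reverse traversal with running power-of-33 weight, as in Source B
def add1505Shl5Hash32_alt (inString : String) (fName : String) : Int :=
  let st := inString.toList.reverse.foldl
    (fun (s : Int × Int) ch =>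
      (PySem.Int.mod (s.1 + (ch.toNat : Int) * s.2) 0x100000000,
       PySem.Int.mod (s.2 * 33) 0x100000000))
    (0, 1)
  PySem.Int.mod (st.1 + 0x1505 * st.2) 0x100000000

-- ===== PRECONDITION & SPEC =====
def Spec_add1505Shl5Hash32 (inString : String) (fName : String) (out : Int) : Prop := out = add1505Shl5Hash32_alt inString fName
instance (inString : String) (fName : String) (out : Int) : Decidable (Spec_add1505Shl5Hash32 inString fName out) := by unfold Spec_add1505Shl5Hash32; infer_instance

-- ===== CLAIM (what is proved, stated in full; the proofs are below) =====
def Claim_equal_add1505Shl5Hash32 : Prop := ∀ (inString : String) (fName : String), Dom_add1505Shl5Hash32 inString fName → Spec_add1505Shl5Hash32 inString fName (add1505Shl5Hash32 inString fName)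

-- ===== LEMMAS AND PROOFS =====

-- abbreviations for the two step functions (definitionally equal to the ports' lambdas)
def pvStepA (val : Int) (ch : Char) : Int :=
  PySem.Int.band (PySem.Int.band (val + (val <<< (5 : Nat))) 0xFFFFFFFF + (ch.toNat : Int)) 0xFFFFFFFF

def pvStepB (s : Int × Int) (ch : Char) : Int × Int :=
  (PySem.Int.mod (s.1 + (ch.toNat : Int) * s.2) 0x100000000,
   PySem.Int.mod (s.2 * 33) 0x100000000)

theorem pvBandMask (a : Int) (ha : 0 ≤ a) : PySem.Int.band a 0xFFFFFFFF = a % 4294967296 := by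
  rw [PySem.Int.band_of_nonneg ha (by norm_num)]
  have h : (0xFFFFFFFF : Int).toNat = 2 ^ 32 - 1 := by decide
  rw [h, Nat.and_two_pow_sub_one_eq_mod]
  omega

theorem pvModPos : 0 < (0x100000000 : Int) := by norm_num

theorem pvStepA_eq (v : Int) (c : Char) (hv : 0 ≤ v) :
    pvStepA v c = (33 * v + (c.toNat : Int)) % 4294967296 := by
  unfold pvStepA
  have h32 : v <<< (5 : Nat) = v * 32 := by rw [Int.shiftLeft_eq]; norm_num
  rw [h32, pvBandMask (v + v * 32) (by positivity),
      pvBandMask ((v + v * 32) % 4294967296 + (c.toNat : Int))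
        (by have := Int.emod_nonneg (v + v * 32) (by norm_num : (4294967296:Int) ≠ 0); positivity)]
  have : (33 : Int) * v + (c.toNat : Int) = (v + v * 32) + (c.toNat : Int) := by ring
  rw [this]
  exact Int.ModEq.add_right _ (Int.emod_emod_of_dvd _ dvd_rfl)

-- main invariant: running A's fold from v over l equals (v * P + Acc) mod 2^32,
-- where (Acc, P) is B's state after consuming l in reverse order
theorem pvInvariant (l : List Char) (v : Int) (hv : 0 ≤ v) (hv2 : v < 4294967296) :
    l.foldl pvStepA v =
      (v * (l.reverse.foldl pvStepB (0, 1)).2 + (l.reverse.foldl pvStepB (0, 1)).1) % 4294967296 := by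
  induction l generalizing v with
  | nil => simp; omega
  | cons c l ih =>
    have hstep : pvStepA v c = (33 * v + (c.toNat : Int)) % 4294967296 := pvStepA_eq v c hv
    have hnn : 0 ≤ pvStepA v c := by
      rw [hstep]; exact Int.emod_nonneg _ (by norm_num)
    have hlt : pvStepA v c < 4294967296 := by
      rw [hstep]; exact Int.emod_lt_of_pos _ (by norm_num)
    rw [List.foldl_cons, ih _ hnn hlt, hstep]
    rw [List.reverse_cons, List.foldl_append]
    set A := (l.reverse.foldl pvStepB (0, 1)).1 with hA
    set P := (l.reverse.foldl pvStepB (0, 1)).2 with hP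
    show ((33 * v + (c.toNat : Int)) % 4294967296 * P + A) % 4294967296 =
      ((v * PySem.Int.mod (P * 33) 0x100000000) + PySem.Int.mod (A + (c.toNat : Int) * P) 0x100000000) % 4294967296
    rw [PySem.Int.mod_eq_emod_of_pos pvModPos, PySem.Int.mod_eq_emod_of_pos pvModPos]
    have h1 : ((33 * v + (c.toNat : Int)) % 4294967296 * P + A) % 4294967296 =
        ((33 * v + (c.toNat : Int)) * P + A) % 4294967296 :=
      Int.ModEq.add_right A (Int.ModEq.mul_right P (Int.emod_emod_of_dvd _ dvd_rfl))
    have h2 : (v * ((P * 33) % 4294967296) + (A + (c.toNat : Int) * P) % 4294967296) % 4294967296 =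
        (v * (P * 33) + (A + (c.toNat : Int) * P)) % 4294967296 :=
      Int.ModEq.add (Int.ModEq.mul_left v (Int.emod_emod_of_dvd _ dvd_rfl))
        (Int.emod_emod_of_dvd _ dvd_rfl)
    rw [h1, h2]
    ring_nf

-- ===== VERDICT (by name: the statement is the Claim_ definition above) =====
theorem add1505Shl5Hash32_spec : Claim_equal_add1505Shl5Hash32 := by
  intro inString fName _
  show add1505Shl5Hash32 inString fName = add1505Shl5Hash32_alt inString fName
  calc add1505Shl5Hash32 inString fName
      = inString.toList.foldl pvStepA 0x1505 := rfl
    _ = (0x1505 * (inString.toList.reverse.foldl pvStepB (0, 1)).2 +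
          (inString.toList.reverse.foldl pvStepB (0, 1)).1) % 4294967296 :=
        pvInvariant inString.toList 0x1505 (by norm_num) (by norm_num)
    _ = add1505Shl5Hash32_alt inString fName := by
        show _ = PySem.Int.mod ((inString.toList.reverse.foldl pvStepB (0, 1)).1 +
          0x1505 * (inString.toList.reverse.foldl pvStepB (0, 1)).2) 0x100000000
        rw [PySem.Int.mod_eq_emod_of_pos pvModPos]
        ring_nf
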